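-- pv_equiv track=rewrite | github.com/rakash/DS-Algorithms | Sorting.py | balancedSplitExists
-- ===== SOURCE A (Python) =====
-- def balancedSplitExists(arr: list) -> bool:
--     # [1, 5, 7, 1]
--     arr.sort()  ## O(nlogn)
--     # [1, 1, 5, 7]
--
--     arr_cumsum = arr.copy()
--     for i in range(1, len(arr_cumsum)):
--         arr_cumsum[i] += arr_cumsum[i-1]
--     for i in range(len(arr) - 1):
--         if arr_cumsum[i]*2 == arr_cumsum[-1] and arr[i] != arr[i+1]:
--             return True
--     return False
-- ===== SOURCE B (Python) =====
-- def balancedSplitExists(arr: list) -> bool: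
--     # Count each value in a dict, then scan the sorted DISTINCT values once,
--     # adding v*count[v]; a valid split boundary is exactly after some distinct
--     # value that is not the largest.  (Does not sort arr, unlike the original.)
--     counts = {}
--     for x in arr:
--         counts[x] = counts.get(x, 0) + 1
--     total = sum(arr)
--     cum = 0
--     for v in sorted(counts)[:-1]:
--         cum += v * counts[v]
--         if 2 * cum == total:
--             return True
--     return False
-- ===== Notes on version B (the rewrite author's own statement) =====
-- stated objective: alternative
-- what changed: Instead of sorting the array and scanning adjacent positions of a cumulative-sum array, B builds a value->count dict in one pass, sorts only the distinct values, and scans them once with a running sum of v*count[v]; the adjacent-inequality test disappears because every distinct-value boundary is a candidate split.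
import Mathlib
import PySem

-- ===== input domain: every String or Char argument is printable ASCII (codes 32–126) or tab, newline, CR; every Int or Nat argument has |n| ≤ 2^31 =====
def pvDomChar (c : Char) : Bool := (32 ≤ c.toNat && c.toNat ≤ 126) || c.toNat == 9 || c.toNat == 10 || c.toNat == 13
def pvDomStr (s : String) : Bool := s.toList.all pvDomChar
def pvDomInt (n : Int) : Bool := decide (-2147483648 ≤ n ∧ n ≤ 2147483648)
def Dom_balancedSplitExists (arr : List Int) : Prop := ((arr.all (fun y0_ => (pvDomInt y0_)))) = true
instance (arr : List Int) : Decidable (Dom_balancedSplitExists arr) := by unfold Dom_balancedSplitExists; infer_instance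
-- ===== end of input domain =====

-- B counts values in a dict and scans the sorted DISTINCT values with a running sum of
-- v*count[v], instead of A's sort + cumulative-sum array + adjacent-inequality scan
-- (objective: alternative).  A sorts its Python argument in place and B does not; the
-- equivalence proved here is about the return value only.

-- ===== PORT A =====
-- the loop 'for i in range(1, len(arr_cumsum)): arr_cumsum[i] += arr_cumsum[i-1]'
def pvCumsumLoop (c : List Int) : List Int :=
  (PySem.List.pyRange 1 (c.length : Int) 1).foldl
    (fun c i => PySem.List.pySetD c i (PySem.List.pyGetD c i 0 + PySem.List.pyGetD c (i - 1) 0)) c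

def balancedSplitExists (arr : List Int) : Bool :=
  let s := PySem.List.sorted arr (fun x => x) false
  let c := pvCumsumLoop s
  (PySem.List.pyRange 0 ((s.length : Int) - 1) 1).any
    (fun i => decide (PySem.List.pyGetD c i 0 * 2 = PySem.List.pyGetD c (-1) 0) &&
              decide (PySem.List.pyGetD s i 0 ≠ PySem.List.pyGetD s (i + 1) 0))

-- ===== PORT B =====
-- the loop 'for v in sorted(counts)[:-1]: cum += v * counts[v]; if 2*cum == total: return True'
def pvBLoop (counts : PySem.Dict Int Int) (total : Int) : Int → List Int → Bool
  | _, [] => false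
  | cum, v :: rest =>
      let cum' := cum + v * counts.getD v 0
      decide (2 * cum' = total) || pvBLoop counts total cum' rest

def balancedSplitExists_alt (arr : List Int) : Bool :=
  let counts := arr.foldl (fun d x => d.insert x (d.getD x 0 + 1)) PySem.Dict.empty
  let total := arr.foldl (· + ·) 0
  pvBLoop counts total 0
    (PySem.List.slice (PySem.List.sorted counts.keys (fun x => x) false) none (some (-1)))

-- ===== PRECONDITION & SPEC =====
def Spec_balancedSplitExists (arr : List Int) (out : Bool) : Prop := out = balancedSplitExists_alt arr
instance (arr : List Int) (out : Bool) : Decidable (Spec_balancedSplitExists arr out) := by unfold Spec_balancedSplitExists; infer_instance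

-- ===== CLAIM (what is proved, stated in full; the proofs are below) =====
def Claim_equal_balancedSplitExists : Prop := ∀ (arr : List Int), Dom_balancedSplitExists arr → Spec_balancedSplitExists arr (balancedSplitExists arr)

-- ===== LEMMAS AND PROOFS =====

theorem foldl_add_eq (l : List Int) (a : Int) : l.foldl (· + ·) a = a + l.sum := by
  induction l generalizing a with
  | nil => simp
  | cons x xs ih => simp [ih, List.sum_cons]; ring

/-- Running prefix sums shifted by `p`: `prefixFrom p [x₁,x₂,…] = [p+x₁, p+x₁+x₂, …]`. -/
def prefixFrom (p : Int) : List Int → List Int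
  | [] => []
  | x :: xs => (p + x) :: prefixFrom (p + x) xs

/-- A's index scan written as a structural recursion over adjacent pairs. -/
def pvAScan (total : Int) : Int → List Int → Bool
  | running, x :: y :: rest =>
      (decide (2 * (running + x) = total) && decide (x ≠ y)) || pvAScan total (running + x) (y :: rest)
  | _, _ => false

/-- B's scan with the dict abstracted into a count function. -/
def pvBScan (cnt : Int → Int) (total : Int) : Int → List Int → Bool
  | _, [] => false
  | cum, v :: rest =>
      let cum' := cum + v * cnt v
      decide (2 * cum' = total) || pvBScan cnt total cum' rest

/-- Adjacent deduplication; on a sorted list this is the sorted list of distinct values. -/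
def sdist : List Int → List Int
  | [] => []
  | [x] => [x]
  | x :: y :: r => if x = y then sdist (y :: r) else x :: sdist (y :: r)

theorem cumsum_inv (done rest : List Int) (hd : done ≠ []) :
    (PySem.List.pyRange (done.length : Int) ((done.length : Int) + (rest.length : Int)) 1).foldl
      (fun c i => PySem.List.pySetD c i (PySem.List.pyGetD c i 0 + PySem.List.pyGetD c (i - 1) 0))
      (done ++ rest)
    = done ++ prefixFrom (done.getLast hd) rest := by
  induction rest generalizing done with
  | nil => simp [PySem.List.pyRange_one_eq_nil, prefixFrom]
  | cons x rest ih =>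
      rw [PySem.List.pyRange_one_cons (by simp only [List.length_cons]; push_cast; omega),
          List.foldl_cons]
      have hlen : done.length - 1 < done.length := by
        cases done with | nil => simp at hd | cons a l => simp
      have hget1 : PySem.List.pyGetD (done ++ x :: rest) (done.length : Int) 0 = x := by
        simp [PySem.List.pyGetD_natCast, List.getD_eq_getElem?_getD]
      have hget2 : PySem.List.pyGetD (done ++ x :: rest) ((done.length : Int) - 1) 0
          = done.getLast hd := by
        have h1 : ((done.length : Int) - 1) = ((done.length - 1 : Nat) : Int) := by
          cases done with | nil => simp at hd | cons a l => push_cast; omega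
        rw [h1, PySem.List.pyGetD_natCast, List.getD_eq_getElem?_getD,
            List.getElem?_append_left hlen]
        simp [List.getLast_eq_getElem, hlen]
      have hstep :
          PySem.List.pySetD (done ++ x :: rest) (done.length : Int)
            (PySem.List.pyGetD (done ++ x :: rest) (done.length : Int) 0 +
             PySem.List.pyGetD (done ++ x :: rest) ((done.length : Int) - 1) 0)
          = (done ++ [x + done.getLast hd]) ++ rest := by
        rw [hget1, hget2, PySem.List.pySetD_natCast, List.set_append_right _ _ (le_refl _)]
        simp
      rw [hstep]
      have hrv : ((done.length : Int) + 1) = (((done ++ [x + done.getLast hd]).length : Nat) : Int) := by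
        simp
      have hb : ((done.length : Int) + ((rest.length : Nat) + 1 : Nat)) =
          (((done ++ [x + done.getLast hd]).length : Nat) : Int) + (rest.length : Int) := by
        simp; push_cast; omega
      simp only [List.length_cons]
      rw [hb, hrv, ih (done ++ [x + done.getLast hd]) (by simp)]
      have hl2 : (done ++ [x + done.getLast hd]).getLast (by simp) = x + done.getLast hd := by simp
      rw [hl2]
      simp only [List.append_assoc, List.singleton_append, prefixFrom, List.append_cancel_left_eq,
        List.cons.injEq]
      exact ⟨by ring, by rw [show done.getLast hd + x = x + done.getLast hd from by ring]⟩

theorem cumsumLoop_eq (s : List Int) : pvCumsumLoop s = prefixFrom 0 s := by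
  cases s with
  | nil => rfl
  | cons x xs =>
      have h := cumsum_inv [x] xs (by simp)
      unfold pvCumsumLoop
      simp only [List.singleton_append] at h
      have hr : PySem.List.pyRange 1 (((x :: xs).length : Nat) : Int) 1
          = PySem.List.pyRange (([x].length : Nat) : Int) ((([x].length : Nat) : Int) + (xs.length : Int)) 1 := by
        congr 1 <;> simp [add_comm]
      rw [hr, h]
      simp [prefixFrom]

theorem prefixFrom_getLast (p x : Int) (xs : List Int) :
    (prefixFrom p (x :: xs)).getLast (by simp [prefixFrom]) = p + (x :: xs).sum := by
  induction xs generalizing p x with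
  | nil => simp [prefixFrom]
  | cons y ys ih =>
      have h := ih (p + x) y
      simp only [prefixFrom] at h ⊢
      rw [List.getLast_cons (by simp [prefixFrom]), h]
      simp [List.sum_cons]
      ring

theorem scan_eq (s : List Int) (p total : Int) (h : total = p + s.sum) :
    (PySem.List.pyRange 0 ((s.length : Int) - 1) 1).any
      (fun i => decide (PySem.List.pyGetD (prefixFrom p s) i 0 * 2 = total) &&
                decide (PySem.List.pyGetD s i 0 ≠ PySem.List.pyGetD s (i + 1) 0))
    = pvAScan total p s := by
  induction s generalizing p with
  | nil => simp [PySem.List.pyRange_one_eq_nil, pvAScan]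
  | cons x xs ih =>
      cases xs with
      | nil => simp [PySem.List.pyRange_one_eq_nil, pvAScan]
      | cons y rest =>
          rw [PySem.List.pyRange_one_cons (by simp only [List.length_cons]; push_cast; omega),
              List.any_cons]
          simp only [pvAScan]
          congr 1
          · simp only [prefixFrom, PySem.List.pyGetD_zero_cons]
            have h1 : PySem.List.pyGetD (x :: y :: rest) (0 + 1) 0 = y := by
              rw [show ((0 : Int) + 1) = ((1 : Nat) : Int) from by norm_num,
                  PySem.List.pyGetD_natCast]
              rfl
            rw [h1, mul_comm]
          · have hr1 : PySem.List.pyRange (0 + 1) (((x :: y :: rest).length : Int) - 1) 1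
                = (List.range rest.length).map (fun k => ((k + 1 : Nat) : Int)) := by
              rw [PySem.List.pyRange_one]
              rw [show ((((x :: y :: rest).length : Int) - 1) - (0 + 1)).toNat = rest.length from by
                simp only [List.length_cons]; push_cast; omega]
              apply List.map_congr_left
              intro k _
              push_cast; ring
            have hr2 : PySem.List.pyRange 0 (((y :: rest).length : Int) - 1) 1
                = (List.range rest.length).map (fun k => ((k : Nat) : Int)) := by
              rw [PySem.List.pyRange_one]
              rw [show ((((y :: rest).length : Int) - 1) - 0).toNat = rest.length from by
                simp only [List.length_cons]; push_cast; omega]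
              apply List.map_congr_left
              intro k _
              push_cast; ring
            have hih := ih (p + x) (by
              rw [h]
              simp [List.sum_cons]
              ring)
            rw [hr2, List.any_map] at hih
            rw [hr1, List.any_map, ← hih]
            apply List.any_congr rfl
            intro k
            simp only [Function.comp]
            have e1 : PySem.List.pyGetD (prefixFrom p (x :: y :: rest)) ((k + 1 : Nat) : Int) 0
                = PySem.List.pyGetD (prefixFrom (p + x) (y :: rest)) ((k : Nat) : Int) 0 := by
              simp only [prefixFrom, PySem.List.pyGetD_natCast, List.getD_cons_succ]
            have e2 : PySem.List.pyGetD (x :: y :: rest) ((k + 1 : Nat) : Int) 0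
                = PySem.List.pyGetD (y :: rest) ((k : Nat) : Int) 0 := by
              simp only [PySem.List.pyGetD_natCast, List.getD_cons_succ]
            have e3 : PySem.List.pyGetD (x :: y :: rest) (((k + 1 : Nat) : Int) + 1) 0
                = PySem.List.pyGetD (y :: rest) (((k : Nat) : Int) + 1) 0 := by
              rw [show (((k + 1 : Nat) : Int) + 1) = ((k + 2 : Nat) : Int) from by push_cast; ring,
                  show (((k : Nat) : Int) + 1) = ((k + 1 : Nat) : Int) from by push_cast; ring,
                  PySem.List.pyGetD_natCast, PySem.List.pyGetD_natCast]
              simp [List.getD_cons_succ]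
            rw [e1, e2, e3]

/-- A's port equals the adjacent-pair scan over the sorted list. -/
theorem A_eq_aScan (arr : List Int) :
    balancedSplitExists arr
      = pvAScan (PySem.List.sorted arr (fun x => x) false).sum 0
          (PySem.List.sorted arr (fun x => x) false) := by
  unfold balancedSplitExists
  set s := PySem.List.sorted arr (fun x => x) false with hs
  simp only
  rw [cumsumLoop_eq]
  cases hcase : s with
  | nil => simp [PySem.List.pyRange_one_eq_nil, prefixFrom, pvAScan]
  | cons x xs =>
      have hlast : PySem.List.pyGetD (prefixFrom 0 (x :: xs)) (-1) 0 = 0 + (x :: xs).sum := by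
        rw [PySem.List.pyGetD_neg_one _ _ (by simp [prefixFrom])]
        exact prefixFrom_getLast 0 x xs
      rw [hlast, zero_add]
      exact scan_eq (x :: xs) 0 ((x :: xs).sum) (by ring)

-- ---- sdist lemmas ----

theorem sdist_cons_cons (x y : Int) (r : List Int) :
    sdist (x :: y :: r) = if x = y then sdist (y :: r) else x :: sdist (y :: r) := rfl

theorem mem_sdist (l : List Int) (x : Int) : x ∈ sdist l ↔ x ∈ l := by
  induction l with
  | nil => simp [sdist]
  | cons a t ih =>
      cases t with
      | nil => simp [sdist]
      | cons b r =>
          rw [sdist_cons_cons]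
          by_cases hab : a = b
          · rw [if_pos hab]; subst hab; rw [ih]; simp
          · rw [if_neg hab]; simp [ih]

theorem sdist_ne_nil (a : Int) (t : List Int) : sdist (a :: t) ≠ [] := by
  intro h
  have := (mem_sdist (a :: t) a).mpr (by simp)
  rw [h] at this
  simp at this

theorem sdist_pairwise (l : List Int) (h : l.Pairwise (· ≤ ·)) :
    (sdist l).Pairwise (· < ·) := by
  induction l with
  | nil => simp [sdist]
  | cons a t ih =>
      cases t with
      | nil => simp [sdist]
      | cons b r =>
          have ht : (b :: r).Pairwise (· ≤ ·) := (List.pairwise_cons.mp h).2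
          rw [sdist_cons_cons]
          by_cases hab : a = b
          · simpa [hab] using ih ht
          · have hle := (List.pairwise_cons.mp h).1
            have hab' : a < b := lt_of_le_of_ne (hle b (by simp)) hab
            simp only [hab, if_false]
            refine List.pairwise_cons.mpr ⟨?_, ih ht⟩
            intro z hz
            have hzmem : z ∈ b :: r := (mem_sdist _ z).mp hz
            rcases List.mem_cons.mp hzmem with h1 | h1
            · omega
            · have := (List.pairwise_cons.mp ht).1 z h1
              omega

theorem sdist_replicate_append (k : Nat) (v : Int) (r : List Int)
    (hr : r = [] ∨ ∃ h t, r = h :: t ∧ v ≠ h) :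
    sdist (List.replicate (k + 1) v ++ r) = v :: sdist r := by
  induction k with
  | zero =>
      rcases hr with h | ⟨h, t, rfl, hne⟩
      · subst h; rfl
      · simp only [List.replicate, List.singleton_append]
        rw [sdist_cons_cons, if_neg hne]
  | succ k ih =>
      have : List.replicate (k + 2) v ++ r = v :: v :: (List.replicate k v ++ r) := by
        simp [List.replicate_succ]
      rw [this, sdist_cons_cons, if_pos rfl]
      have h2 : v :: (List.replicate k v ++ r) = List.replicate (k + 1) v ++ r := by
        simp [List.replicate_succ]
      rw [h2, ih]

-- ---- the run lemma for A's scan ----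

theorem aScan_run (k : Nat) (t : Int) (cum v : Int) (r : List Int) :
    pvAScan t cum (List.replicate (k + 1) v ++ r)
      = match r with
        | [] => false
        | h :: _ =>
            (decide (2 * (cum + ((k : Int) + 1) * v) = t) && decide (v ≠ h))
              || pvAScan t (cum + ((k : Int) + 1) * v) r := by
  induction k generalizing cum with
  | zero =>
      cases r with
      | nil => simp [pvAScan]
      | cons h rr => simp [pvAScan]
  | succ k ih =>
      have : List.replicate (k + 2) v ++ r = v :: v :: (List.replicate k v ++ r) := by
        simp [List.replicate_succ]
      rw [this]
      have h2 : v :: (List.replicate k v ++ r) = List.replicate (k + 1) v ++ r := by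
        simp [List.replicate_succ]
      have hstep : pvAScan t cum (v :: v :: (List.replicate k v ++ r))
          = pvAScan t (cum + v) (List.replicate (k + 1) v ++ r) := by
        rw [← h2]; simp [pvAScan]
      rw [hstep, ih]
      cases r with
      | nil => rfl
      | cons h rr =>
          simp only
          have : cum + v + ((k : Int) + 1) * v = cum + (((k : Nat) + 1 : Int) + 1) * v := by
            push_cast; ring
          rw [this]
          push_cast
          ring_nf

-- ---- the main correspondence ----

theorem main_scan (n : Nat) : ∀ (s : List Int), s.length = n → s.Pairwise (· ≤ ·) →
    ∀ (cnt : Int → Int), (∀ v ∈ s, cnt v = (s.count v : Int)) →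
    ∀ (t cum : Int),
      pvAScan t cum s = pvBScan cnt t cum ((sdist s).dropLast) := by
  induction n using Nat.strong_induction_on with
  | _ n ih =>
      intro s hlen hp cnt hcnt t cum
      cases hs : s with
      | nil => simp [pvAScan, sdist, pvBScan]
      | cons v s' =>
          subst hs
          -- decompose the leading run
          obtain ⟨k, r, hsplit, hrne⟩ :
              ∃ (k : Nat) (r : List Int), v :: s' = List.replicate (k + 1) v ++ r ∧
                (r = [] ∨ ∃ h t, r = h :: t ∧ v ≠ h) := by
            refine ⟨(s'.takeWhile (fun x => decide (x = v))).length,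
                    s'.dropWhile (fun x => decide (x = v)), ?_, ?_⟩
            · have h1 : s'.takeWhile (fun x => decide (x = v))
                  = List.replicate (s'.takeWhile (fun x => decide (x = v))).length v := by
                apply List.eq_replicate_of_mem
                intro b hb
                have := List.mem_takeWhile_imp hb
                simpa using this
              have h2 : s' = s'.takeWhile (fun x => decide (x = v))
                  ++ s'.dropWhile (fun x => decide (x = v)) :=
                (List.takeWhile_append_dropWhile).symm
              rw [List.replicate_succ, List.cons_append]
              conv_lhs => rw [h2]
              rw [← h1]
            · cases hr : s'.dropWhile (fun x => decide (x = v)) with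
              | nil => exact Or.inl rfl
              | cons h rr =>
                  refine Or.inr ⟨h, rr, rfl, ?_⟩
                  have hq := List.head?_dropWhile_not (fun x => decide (x = v)) s'
                  rw [hr] at hq
                  simp only [List.head?_cons] at hq
                  simp at hq
                  exact fun hvh => hq hvh.symm
          -- facts from sortedness
          have hsub : r.Pairwise (· ≤ ·) ∧ ∀ y ∈ r, v ≤ y := by
            have hpr := hp
            rw [hsplit, List.pairwise_append] at hpr
            exact ⟨hpr.2.1, fun y hy => hpr.2.2 v (by simp) y hy⟩
          have hvnotr : v ∉ r := by
            rcases hrne with hnil | ⟨h, tl, hr, hne⟩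
            · simp [hnil]
            · intro hmem
              rw [hr] at hmem hsub
              rcases List.mem_cons.mp hmem with h1 | h1
              · exact hne h1
              · have h2 : h ≤ v := (List.pairwise_cons.mp hsub.1).1 v h1
                have h3 : v ≤ h := hsub.2 h (by simp)
                exact hne (le_antisymm h3 h2)
          have hcount_v : (v :: s').count v = k + 1 := by
            rw [hsplit, List.count_append, List.count_replicate, if_pos (by simp)]
            rw [List.count_eq_zero.mpr hvnotr]
          have hcount_r : ∀ w ∈ r, (v :: s').count w = r.count w := by
            intro w hw
            have hwv : w ≠ v := by
              intro h; subst h; exact hvnotr hw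
            rw [hsplit, List.count_append, List.count_replicate,
                if_neg (by simp [Ne.symm hwv]), Nat.zero_add]
          -- rewrite both sides
          rw [hsplit, aScan_run, sdist_replicate_append k v r hrne]
          rcases hrne with hnil | ⟨h, tl, hr, hne⟩
          · rw [hnil]
            simp [sdist, pvBScan]
          · have hrne' : sdist r ≠ [] := by rw [hr]; exact sdist_ne_nil h tl
            have hdl : (v :: sdist r).dropLast = v :: (sdist r).dropLast := by
              cases hsd : sdist r with
              | nil => exact absurd hsd hrne'
              | cons a l => simp
            rw [hdl]
            rw [hr] at hsub hcount_r ⊢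
            simp only [pvBScan]
            have hcntv : cnt v = ((k : Int) + 1) := by
              rw [hcnt v (by simp), hcount_v]; push_cast; ring
            have harg : cum + v * cnt v = cum + ((k : Int) + 1) * v := by
              rw [hcntv]; ring
            rw [harg]
            have hlt : (h :: tl).length < n := by
              have h1 := congrArg List.length hsplit
              rw [hr] at h1
              simp only [List.length_cons, List.length_append, List.length_replicate] at h1 hlen ⊢
              omega
            have hrec := ih (h :: tl).length hlt (h :: tl) rfl hsub.1 cnt
              (fun w hw => by
                rw [hcnt w (by rw [hsplit, hr]; exact List.mem_append_right _ hw)]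
                exact congrArg _ (hcount_r w hw))
              t (cum + ((k : Int) + 1) * v)
            rw [hrec]
            simp [hne]

-- ---- B's port in abstract form ----

theorem pvBLoop_eq_bScan (d : PySem.Dict Int Int) (t : Int) (cum : Int) (l : List Int) :
    pvBLoop d t cum l = pvBScan (fun v => d.getD v 0) t cum l := by
  induction l generalizing cum with
  | nil => rfl
  | cons v rest ih => simp [pvBLoop, pvBScan, ih]

theorem bScan_congr (c1 c2 : Int → Int) (t cum : Int) (l : List Int)
    (h : ∀ v ∈ l, c1 v = c2 v) :
    pvBScan c1 t cum l = pvBScan c2 t cum l := by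
  induction l generalizing cum with
  | nil => rfl
  | cons v rest ih =>
      simp only [pvBScan]
      rw [h v (by simp)]
      congr 1
      exact ih _ (fun w hw => h w (List.mem_cons_of_mem _ hw))

-- ===== VERDICT (by name: the statement is the Claim_ definition above) =====
theorem balancedSplitExists_spec : Claim_equal_balancedSplitExists := by
  intro arr _
  unfold Spec_balancedSplitExists
  rw [A_eq_aScan]
  set s := PySem.List.sorted arr (fun x => x) false with hs
  have hperm : s.Perm arr := PySem.List.sorted_perm arr (fun x => x) false
  have hpair : s.Pairwise (· ≤ ·) := by
    simpa using PySem.List.sorted_pairwise (xs := arr) (key := fun x => x)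
  unfold balancedSplitExists_alt
  simp only
  rw [PySem.Dict.foldl_insert_getD_add_one_eq_counter, pvBLoop_eq_bScan,
      PySem.Dict.keys_counter, PySem.List.slice_to_neg_one, foldl_add_eq, zero_add]
  -- sorted distinct values = sdist s
  have hVd : PySem.List.sorted (PySem.Set.ofList arr) (fun x => x) false = sdist s := by
    apply PySem.List.sorted_id_eq_of_perm_of_pairwise
    · apply (List.perm_ext_iff_of_nodup ?_ ?_).mpr
      · intro a
        rw [mem_sdist]
        rw [PySem.Set.mem_ofList]
        exact hperm.mem_iff
      · exact List.Pairwise.imp ne_of_lt (sdist_pairwise s hpair)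
      · exact PySem.Set.nodup_ofList arr
    · exact (sdist_pairwise s hpair).imp le_of_lt
  rw [hVd]
  have hsum : arr.sum = s.sum := (hperm.sum_eq).symm
  rw [← hsum] at *
  rw [main_scan s.length s rfl hpair (fun v => (s.count v : Int))
        (fun v _ => rfl) arr.sum 0]
  apply bScan_congr
  intro v hv
  rw [PySem.Dict.getD_counter]
  exact congrArg _ (hperm.count_eq v)
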